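-- pv_equiv track=rewrite | github.com/diegopacheco/ai-playground | pocs/cc-hook-better-permissions/permissions.py | check_glob
-- ===== SOURCE A (Python) =====
-- CREDENTIAL_SUBSTRINGS = [
--     "id_rsa",
--     "id_ed25519",
--     "id_ecdsa",
--     "id_dsa",
--     ".ssh/",
--     ".aws/credentials",
--     ".gnupg/",
--     ".netrc",
--     ".kube/config",
--     ".docker/config.json",
--     ".npmrc",
--     ".pypirc",
--     ".git-credentials",
--     "hosts.yml",
-- ]
--
-- def make_allow(reason="auto-approved by permissions hook"):
--     return {
--         "hookSpecificOutput": {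
--             "hookEventName": "PreToolUse",
--             "permissionDecision": "allow",
--             "permissionDecisionReason": reason
--         }
--     }
--
-- def make_block(reason):
--     return {
--         "hookSpecificOutput": {
--             "hookEventName": "PreToolUse",
--             "permissionDecision": "deny",
--             "permissionDecisionReason": reason
--         }
--     }
--
-- def check_glob(tool_input):
--     pattern = tool_input.get("pattern", "")
--     path = tool_input.get("path", "")
--     for check in [pattern, path]:
--         if check:
--             for substr in CREDENTIAL_SUBSTRINGS:
--                 if substr in check:
--                     return make_block("Blocked: glob pattern targets credential directory")
--     return make_allow("safe glob")
-- ===== SOURCE B (Python) =====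
-- CREDENTIAL_SUBSTRINGS = [
--     "id_rsa",
--     "id_ed25519",
--     "id_ecdsa",
--     "id_dsa",
--     ".ssh/",
--     ".aws/credentials",
--     ".gnupg/",
--     ".netrc",
--     ".kube/config",
--     ".docker/config.json",
--     ".npmrc",
--     ".pypirc",
--     ".git-credentials",
--     "hosts.yml",
-- ]
--
-- # First-character index over the credential substrings, built once at module
-- # scope: at each scan position only the substrings starting with that
-- # character are tried.
-- _BY_FIRST = {}
-- for _s in CREDENTIAL_SUBSTRINGS:
--     _BY_FIRST.setdefault(_s[0], []).append(_s)
--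
--
-- def make_allow(reason="auto-approved by permissions hook"):
--     return {
--         "hookSpecificOutput": {
--             "hookEventName": "PreToolUse",
--             "permissionDecision": "allow",
--             "permissionDecisionReason": reason
--         }
--     }
--
--
-- def make_block(reason):
--     return {
--         "hookSpecificOutput": {
--             "hookEventName": "PreToolUse",
--             "permissionDecision": "deny",
--             "permissionDecisionReason": reason
--         }
--     }
--
--
-- def check_glob(tool_input):
--     # One position-major scan over pattern and path joined by '\n' (no
--     # credential substring contains '\n', so no match can span the seam).
--     joined = tool_input.get("pattern", "") + "\n" + tool_input.get("path", "")
--     for i, ch in enumerate(joined):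
--         for substr in _BY_FIRST.get(ch, ()):
--             if joined.startswith(substr, i):
--                 return make_block("Blocked: glob pattern targets credential directory")
--     return make_allow("safe glob")
-- ===== Notes on version B (the rewrite author's own statement) =====
-- stated objective: alternative
-- what changed: A loops substring-major ('substr in check' for each of 14 substrings over pattern then path); B joins pattern and path with a '\n' seam and makes one position-major scan, consulting a first-character index dict built once at module scope so only substrings starting with the current character are tried.
import Mathlib
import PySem

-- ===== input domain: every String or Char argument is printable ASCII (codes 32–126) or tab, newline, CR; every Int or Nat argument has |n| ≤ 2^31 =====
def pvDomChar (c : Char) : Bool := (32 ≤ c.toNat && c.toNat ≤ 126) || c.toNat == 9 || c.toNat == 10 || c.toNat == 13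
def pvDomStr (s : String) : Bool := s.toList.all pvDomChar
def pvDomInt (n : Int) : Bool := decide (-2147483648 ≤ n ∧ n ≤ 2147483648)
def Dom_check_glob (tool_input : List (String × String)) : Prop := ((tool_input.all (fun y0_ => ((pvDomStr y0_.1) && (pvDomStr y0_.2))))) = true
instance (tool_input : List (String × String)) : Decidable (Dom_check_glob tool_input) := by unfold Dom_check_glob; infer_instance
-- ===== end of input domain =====

-- B joins pattern and path into one string and scans it position-major with a
-- first-character index over the credential substrings, instead of A's
-- substring-major 'substr in check' loop over pattern then path.

-- shared module constant
def CREDENTIAL_SUBSTRINGS : List String :=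
  ["id_rsa", "id_ed25519", "id_ecdsa", "id_dsa", ".ssh/", ".aws/credentials",
   ".gnupg/", ".netrc", ".kube/config", ".docker/config.json", ".npmrc",
   ".pypirc", ".git-credentials", "hosts.yml"]

def make_allow (reason : String) : List (String × List (String × String)) :=
  [("hookSpecificOutput",
    [("hookEventName", "PreToolUse"),
     ("permissionDecision", "allow"),
     ("permissionDecisionReason", reason)])]

def make_block (reason : String) : List (String × List (String × String)) :=
  [("hookSpecificOutput",
    [("hookEventName", "PreToolUse"),
     ("permissionDecision", "deny"),
     ("permissionDecisionReason", reason)])]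

-- ===== PORT A =====
-- inner loop: 'for substr in CREDENTIAL_SUBSTRINGS: if substr in check: return …'
def aHit (check : String) : Bool :=
  CREDENTIAL_SUBSTRINGS.any (fun substr => PySem.Str.isIn substr check)

-- outer loop: 'for check in [pattern, path]: if check: …' with early return
def aLoop : List String → List (String × List (String × String))
  | [] => make_allow "safe glob"
  | check :: rest =>
    if check ≠ "" then
      if aHit check then make_block "Blocked: glob pattern targets credential directory"
      else aLoop rest
    else aLoop rest

def check_glob (tool_input : List (String × String)) : List (String × List (String × String)) :=
  let pattern := (PySem.Dict.mk tool_input).getD "pattern" ""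
  let path := (PySem.Dict.mk tool_input).getD "path" ""
  aLoop [pattern, path]

-- ===== PORT B =====
-- module-scope '_BY_FIRST.setdefault(s[0], []).append(s)' loop; every
-- credential substring is nonempty, so the 'none' branch of s[0] is unreachable
def BY_FIRST : PySem.Dict Char (List String) :=
  CREDENTIAL_SUBSTRINGS.foldl
    (fun d s =>
      match PySem.Str.pyGet? s 0 with
      | some c => d.insert c ((d.getD c []) ++ [s])
      | none => d)
    PySem.Dict.empty

-- 'for i, ch in enumerate(joined): for substr in _BY_FIRST.get(ch, ()):
--    if joined.startswith(substr, i): …' — the recursion walks the suffix of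
-- joined starting at position i; joined.startswith(substr, i) is isPrefixOf on it
def bScan : List Char → List (String × List (String × String))
  | [] => make_allow "safe glob"
  | c :: rest =>
    if (BY_FIRST.getD c []).any (fun substr => substr.toList.isPrefixOf (c :: rest)) then
      make_block "Blocked: glob pattern targets credential directory"
    else bScan rest

def check_glob_alt (tool_input : List (String × String)) : List (String × List (String × String)) :=
  let joined := ((PySem.Dict.mk tool_input).getD "pattern" "").toList
                ++ '\n' :: ((PySem.Dict.mk tool_input).getD "path" "").toList
  bScan joined

-- ===== PRECONDITION & SPEC =====
def Spec_check_glob (tool_input : List (String × String)) (out : List (String × List (String × String))) : Prop := out = check_glob_alt tool_input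
instance (tool_input : List (String × String)) (out : List (String × List (String × String))) : Decidable (Spec_check_glob tool_input out) := by unfold Spec_check_glob; infer_instance

-- ===== CLAIM (what is proved, stated in full; the proofs are below) =====
def Claim_equal_check_glob : Prop := ∀ (tool_input : List (String × String)), Dom_check_glob tool_input → Spec_check_glob tool_input (check_glob tool_input)

-- ===== LEMMAS AND PROOFS =====

-- every credential substring is nonempty and contains no newline
theorem cs_facts : ∀ s ∈ CREDENTIAL_SUBSTRINGS, s.toList ≠ [] ∧ '\n' ∉ s.toList := by decide

-- infix ↔ some suffix has it as a prefix (PySem characterisation, as one rewrite)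
theorem infix_iff_drop (sub t : List Char) : sub <:+: t ↔ ∃ j, sub <+: t.drop j := by
  rw [← PySem.Chars.isIn_iff_infix, ← PySem.Chars.exists_prefix_drop_iff_isIn]

-- the first-character index evaluated: three buckets, CREDENTIAL_SUBSTRINGS order kept
theorem byFirst_eval : BY_FIRST = PySem.Dict.mk
    [('i', ["id_rsa", "id_ed25519", "id_ecdsa", "id_dsa"]),
     ('.', [".ssh/", ".aws/credentials", ".gnupg/", ".netrc", ".kube/config",
            ".docker/config.json", ".npmrc", ".pypirc", ".git-credentials"]),
     ('h', ["hosts.yml"])] := by decide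

-- at a position starting with c, trying BY_FIRST[c] equals trying all substrings
theorem byFirst_any (c : Char) (t : List Char) :
    ((BY_FIRST.getD c []).any (fun s => s.toList.isPrefixOf (c :: t)))
      = (CREDENTIAL_SUBSTRINGS.any (fun s => s.toList.isPrefixOf (c :: t))) := by
  rw [byFirst_eval]
  by_cases h1 : c = 'i'
  · subst h1; simp [CREDENTIAL_SUBSTRINGS, PySem.Dict.getD, PySem.Dict.get?_mk_cons, List.isPrefixOf]
  · by_cases h2 : c = '.'
    · subst h2; simp [CREDENTIAL_SUBSTRINGS, PySem.Dict.getD, PySem.Dict.get?_mk_cons, List.isPrefixOf]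
    · by_cases h3 : c = 'h'
      · subst h3; simp [CREDENTIAL_SUBSTRINGS, PySem.Dict.getD, PySem.Dict.get?_mk_cons, List.isPrefixOf]
      · simp [CREDENTIAL_SUBSTRINGS, PySem.Dict.getD, List.isPrefixOf,
              Ne.symm h1, Ne.symm h2, Ne.symm h3, PySem.Dict.get?]

-- bScan finds a hit iff some credential substring is an infix of its argument
theorem bScan_eq (t : List Char) :
    bScan t = if ∃ s ∈ CREDENTIAL_SUBSTRINGS, s.toList <:+: t
              then make_block "Blocked: glob pattern targets credential directory"
              else make_allow "safe glob" := by
  induction t with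
  | nil =>
    rw [if_neg]
    · rfl
    · rintro ⟨s, hs, hinf⟩
      exact (cs_facts s hs).1 (List.eq_nil_of_infix_nil hinf)
  | cons c rest ih =>
    rw [bScan, byFirst_any, ih]
    by_cases hhead : ∃ s ∈ CREDENTIAL_SUBSTRINGS, s.toList <+: c :: rest
    · obtain ⟨s, hs, hp⟩ := hhead
      rw [if_pos, if_pos]
      · exact ⟨s, hs, hp.isInfix⟩
      · rw [List.any_eq_true]
        exact ⟨s, hs, List.isPrefixOf_iff_prefix.mpr hp⟩
    · have hany : (CREDENTIAL_SUBSTRINGS.any fun s => s.toList.isPrefixOf (c :: rest)) = false := by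
        rw [List.any_eq_false]
        intro s hs
        simp only [List.isPrefixOf_iff_prefix]
        intro hp
        exact hhead ⟨s, hs, hp⟩
      rw [hany, if_neg (by simp)]
      congr 1
      apply propext
      constructor
      · rintro ⟨s, hs, hinf⟩
        exact ⟨s, hs, hinf.trans (List.suffix_cons c rest).isInfix⟩
      · rintro ⟨s, hs, hinf⟩
        refine ⟨s, hs, ?_⟩
        rw [infix_iff_drop] at hinf ⊢
        obtain ⟨j, hj⟩ := hinf
        cases j with
        | zero => exact absurd ⟨s, hs, by simpa using hj⟩ hhead
        | succ j => exact ⟨j, by simpa using hj⟩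

-- splitting an infix across the '\n' seam: no credential substring contains '\n'
theorem infix_join (s p q : List Char) (hnl : '\n' ∉ s) :
    s <:+: p ++ '\n' :: q ↔ s <:+: p ∨ s <:+: q := by
  constructor
  · intro h
    rw [infix_iff_drop] at h
    obtain ⟨j, hj⟩ := h
    rcases le_or_gt j p.length with hle | hgt
    · rw [List.drop_append_of_le_length hle] at hj
      rcases le_or_gt s.length (p.drop j).length with hsl | hsl
      · left
        rcases List.prefix_or_prefix_of_prefix hj (List.prefix_append (p.drop j) ('\n' :: q)) with h1 | h1
        · exact (infix_iff_drop s p).mpr ⟨j, h1⟩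
        · exact (infix_iff_drop s p).mpr ⟨j, (h1.eq_of_length_le hsl) ▸ List.prefix_rfl⟩
      · exfalso
        apply hnl
        have h2 : s[(List.drop j p).length]'hsl = '\n' := by
          rw [hj.getElem (i := (List.drop j p).length) hsl]
          simp
        exact h2 ▸ List.getElem_mem _
    · right
      rw [List.drop_append, List.drop_eq_nil_of_le hgt.le, List.nil_append] at hj
      obtain ⟨k, hk⟩ : ∃ k, j - p.length = k + 1 := ⟨j - p.length - 1, by omega⟩
      rw [hk, List.drop_succ_cons] at hj
      exact (infix_iff_drop s q).mpr ⟨k, hj⟩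
  · rintro (h | h)
    · exact h.trans (List.prefix_append p ('\n' :: q)).isInfix
    · exact h.trans ((List.suffix_cons '\n' q).trans (List.suffix_append_of_suffix (List.suffix_refl _))).isInfix

theorem aHit_iff (check : String) :
    aHit check = true ↔ ∃ s ∈ CREDENTIAL_SUBSTRINGS, s.toList <:+: check.toList := by
  simp [aHit, PySem.Chars.isIn_iff_infix]

theorem aHit_empty : aHit "" = false := by decide

-- A's truthiness guard is redundant: an empty check never hits
theorem aLoop_step (check : String) (rest : List String) :
    aLoop (check :: rest)
      = if aHit check then make_block "Blocked: glob pattern targets credential directory"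
        else aLoop rest := by
  by_cases h : check = ""
  · subst h; simp [aLoop, aHit_empty]
  · simp [aLoop, h]

theorem aLoop_pair (p q : String) :
    aLoop [p, q]
      = if ∃ s ∈ CREDENTIAL_SUBSTRINGS, s.toList <:+: p.toList ∨ s.toList <:+: q.toList
        then make_block "Blocked: glob pattern targets credential directory"
        else make_allow "safe glob" := by
  rw [aLoop_step, aLoop_step]
  by_cases hp : aHit p
  · rw [if_pos hp, if_pos]
    obtain ⟨s, hs, h⟩ := (aHit_iff p).mp hp
    exact ⟨s, hs, Or.inl h⟩
  · rw [if_neg hp]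
    by_cases hq : aHit q
    · rw [if_pos hq, if_pos]
      obtain ⟨s, hs, h⟩ := (aHit_iff q).mp hq
      exact ⟨s, hs, Or.inr h⟩
    · rw [if_neg hq, aLoop, if_neg]
      rintro ⟨s, hs, h | h⟩
      · exact hp ((aHit_iff p).mpr ⟨s, hs, h⟩)
      · exact hq ((aHit_iff q).mpr ⟨s, hs, h⟩)

-- ===== VERDICT (by name: the statement is the Claim_ definition above) =====
theorem check_glob_spec : Claim_equal_check_glob := by
  intro tool_input _
  unfold Spec_check_glob check_glob check_glob_alt
  rw [bScan_eq, aLoop_pair]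
  congr 1
  apply propext
  constructor
  · rintro ⟨s, hs, h⟩
    exact ⟨s, hs, (infix_join s.toList _ _ (cs_facts s hs).2).mpr h⟩
  · rintro ⟨s, hs, h⟩
    exact ⟨s, hs, (infix_join s.toList _ _ (cs_facts s hs).2).mp h⟩
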